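-- pv_equiv track=rewrite | github.com/ashish-kus/Learning | Python/Basic/Practical8.py | dublicate
-- ===== SOURCE A (Python) =====
-- def dublicate(li):
--     size=len(li)
--     dli=[]
--     for i in range(size):
--         k=i+1
--         for j in range(k,size):
--             if li[i]==li[j]:
--                 dli.append(li[j])
--     return dli
-- ===== SOURCE B (Python) =====
-- def dublicate(li):
--     rem = {}
--     for v in li:
--         rem[v] = rem.get(v, 0) + 1
--     dli = []
--     for v in li:
--         rem[v] = rem[v] - 1
--         dli.extend([v] * rem[v])
--     return dli
-- ===== Notes on version B (the rewrite author's own statement) =====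
-- stated objective: faster
-- what changed: Replaced the nested index-pair scan by a single pass that first builds a dict of occurrence counts, then appends each element repeated by its remaining (future) count.
import Mathlib
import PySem

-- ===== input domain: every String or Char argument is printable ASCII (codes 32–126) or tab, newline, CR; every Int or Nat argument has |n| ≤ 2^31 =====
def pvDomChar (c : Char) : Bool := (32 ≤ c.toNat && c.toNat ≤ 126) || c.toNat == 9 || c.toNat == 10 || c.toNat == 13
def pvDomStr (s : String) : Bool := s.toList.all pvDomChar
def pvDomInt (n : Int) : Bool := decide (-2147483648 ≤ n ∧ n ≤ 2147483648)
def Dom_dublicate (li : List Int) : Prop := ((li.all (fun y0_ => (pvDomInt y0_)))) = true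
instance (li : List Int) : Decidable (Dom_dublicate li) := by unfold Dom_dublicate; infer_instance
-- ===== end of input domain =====

-- B replaces A's quadratic index-pair double loop by one pass over a hashmap of
-- remaining occurrence counts (objective: faster, O(n^2) scans → O(n·avg) dict work).

-- ===== PORT A =====
def dublicate (li : List Int) : List Int :=
  let size : Int := PySem.List.len li
  (PySem.List.pyRange 0 size 1).foldl (fun dli i =>
    let k := i + 1
    (PySem.List.pyRange k size 1).foldl (fun dli j =>
      if PySem.List.pyGetD li i 0 = PySem.List.pyGetD li j 0 then
        dli ++ [PySem.List.pyGetD li j 0]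
      else dli) dli) []

-- ===== PORT B =====
def dublicate_alt (li : List Int) : List Int :=
  let rem : PySem.Dict Int Int :=
    li.foldl (fun d v => d.insert v (d.getD v 0 + 1)) PySem.Dict.empty
  (li.foldl (fun (st : PySem.Dict Int Int × List Int) v =>
      let rem' := st.1.insert v (st.1.getD v 0 - 1)
      (rem', st.2 ++ List.replicate (rem'.getD v 0).toNat v)) (rem, [])).2

-- ===== PRECONDITION & SPEC =====
def Spec_dublicate (li : List Int) (out : List Int) : Prop := out = dublicate_alt li
instance (li : List Int) (out : List Int) : Decidable (Spec_dublicate li out) := by unfold Spec_dublicate; infer_instance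

-- ===== CLAIM (what is proved, stated in full; the proofs are below) =====
def Claim_equal_dublicate : Prop := ∀ (li : List Int), Dom_dublicate li → Spec_dublicate li (dublicate li)

-- ===== LEMMAS AND PROOFS =====

/-- Common characterisation: for each element, the duplicates occurring after it. -/
def pvAux : List Int → List Int
  | [] => []
  | x :: xs => List.replicate (xs.count x) x ++ pvAux xs

theorem pvAux_eq_flatMap (li : List Int) :
    pvAux li = (List.range li.length).flatMap
      (fun k => List.replicate ((li.drop (k+1)).count (li.getD k 0)) (li.getD k 0)) := by
  induction li with
  | nil => simp [pvAux]
  | cons x xs ih =>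
    simp only [pvAux, List.length_cons, List.range_succ_eq_map, List.flatMap_cons,
      List.flatMap_map]
    simp [ih]

theorem dublicate_eq_pvAux (li : List Int) : dublicate li = pvAux li := by
  unfold dublicate
  rw [pvAux_eq_flatMap]
  rw [PySem.List.foldl_congr_mem _ _
      (fun acc i => acc ++ List.replicate ((li.drop (i+1).toNat).count (PySem.List.pyGetD li i 0))
        (PySem.List.pyGetD li i 0)) _ ?_]
  · rw [PySem.List.foldl_append_eq_flatMap]
    have hlen : PySem.List.len li = ((li.length : Nat) : Int) := by simp [PySem.List.len]
    rw [hlen, PySem.List.pyRange_zero_nat]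
    simp only [List.flatMap_map, List.nil_append]
    apply List.flatMap_congr
    intro k hk
    have h1 : (((k:Nat):Int)+1).toNat = k+1 := by omega
    rw [h1, PySem.List.pyGetD_natCast]
  · intro acc i hi
    have h0 : (0:Int) ≤ i := ((PySem.List.mem_pyRange_one).1 hi).1
    rw [PySem.List.foldl_pyRange_pyGetD li 0
        (fun dli v => if PySem.List.pyGetD li i 0 = v then dli ++ [v] else dli) acc (by omega)]
    rw [PySem.List.foldl_append_ite_eq_filter (fun v => PySem.List.pyGetD li i 0 = v)]
    congr 1
    have hflip : (List.drop (i+1).toNat li).filter (fun x => decide (PySem.List.pyGetD li i 0 = x))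
        = (List.drop (i+1).toNat li).filter (fun x => decide (x = PySem.List.pyGetD li i 0)) :=
      List.filter_congr (fun x _ => by simp [eq_comm])
    rw [hflip, List.filter_eq]

theorem alt_loop (xs : List Int) (d : PySem.Dict Int Int) (acc : List Int)
    (h : ∀ v, d.getD v 0 = (xs.count v : Int)) :
    (xs.foldl (fun (st : PySem.Dict Int Int × List Int) v =>
        let rem' := st.1.insert v (st.1.getD v 0 - 1)
        (rem', st.2 ++ List.replicate (rem'.getD v 0).toNat v)) (d, acc)).2 = acc ++ pvAux xs := by
  induction xs generalizing d acc with
  | nil => simp [pvAux]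
  | cons x xs ih =>
    simp only [List.foldl_cons]
    have hd' : ∀ v, (d.insert x (d.getD x 0 - 1)).getD v 0 = (xs.count v : Int) := by
      intro v
      rw [PySem.Dict.getD_insert]
      by_cases hv : v = x
      · subst hv; simp [h v]
      · simp [hv, h v, Ne.symm hv]
    rw [ih _ _ hd']
    have hx : (d.insert x (d.getD x 0 - 1)).getD x 0 = (xs.count x : Int) := hd' x
    simp [hx, pvAux]

theorem dublicate_alt_eq_pvAux (li : List Int) : dublicate_alt li = pvAux li := by
  unfold dublicate_alt
  rw [PySem.Dict.foldl_insert_getD_add_one_eq_counter]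
  exact alt_loop li _ [] (fun v => PySem.Dict.getD_counter li v)

-- ===== VERDICT (by name: the statement is the Claim_ definition above) =====
theorem dublicate_spec : Claim_equal_dublicate := by
  intro li _
  unfold Spec_dublicate
  rw [dublicate_eq_pvAux, dublicate_alt_eq_pvAux]
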